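-- pv_equiv track=rewrite | github.com/rubelw/OSSS | src/OSSS/ai/agents/query_data/handlers/webhooks_handler.py | _preferred_field_order
-- ===== SOURCE A (Python) =====
-- from typing import Any, Dict, List
--
-- def _preferred_field_order(all_fields: List[str]) -> List[str]:
--     """
--     Reorder columns so the most useful webhook fields appear first.
--     Unknown fields are appended at the end in original order.
--     """
--     preferred = [
--         "id",
--         "name",
--         "event",
--         "topic",
--         "url",
--         "target_url",
--         "is_active",
--         "enabled",
--         "created_at",
--         "updated_at",
--         "last_success_at",
--         "last_error_at",
--     ]
--
--     ordered: List[str] = []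
--     for f in preferred:
--         if f in all_fields and f not in ordered:
--             ordered.append(f)
--
--     for f in all_fields:
--         if f not in ordered:
--             ordered.append(f)
--
--     return ordered
-- ===== SOURCE B (Python) =====
-- from typing import List
--
-- def _preferred_field_order(all_fields: List[str]) -> List[str]:
--     """
--     Reorder columns so the most useful webhook fields appear first.
--     Unknown fields are appended at the end in original order.
--     """
--     preferred = [
--         "id",
--         "name",
--         "event",
--         "topic",
--         "url",
--         "target_url",
--         "is_active",
--         "enabled",
--         "created_at",
--         "updated_at",
--         "last_success_at",
--         "last_error_at",
--     ]
--     rank = {f: i for i, f in enumerate(preferred)}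
--     deduped = list(dict.fromkeys(all_fields))
--     return sorted(deduped, key=lambda f: rank.get(f, len(preferred)))
-- ===== Notes on version B (the rewrite author's own statement) =====
-- stated objective: simpler
-- what changed: Replaces A's two accumulator-scanning loops (each doing 'f not in ordered' membership scans on the growing result) by building a rank table for the preferred fields, deduplicating all_fields in first-occurrence order via dict.fromkeys, and returning one stable sort keyed by rank (unknown fields keep their key len(preferred), so stability preserves their original order).
import Mathlib
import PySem

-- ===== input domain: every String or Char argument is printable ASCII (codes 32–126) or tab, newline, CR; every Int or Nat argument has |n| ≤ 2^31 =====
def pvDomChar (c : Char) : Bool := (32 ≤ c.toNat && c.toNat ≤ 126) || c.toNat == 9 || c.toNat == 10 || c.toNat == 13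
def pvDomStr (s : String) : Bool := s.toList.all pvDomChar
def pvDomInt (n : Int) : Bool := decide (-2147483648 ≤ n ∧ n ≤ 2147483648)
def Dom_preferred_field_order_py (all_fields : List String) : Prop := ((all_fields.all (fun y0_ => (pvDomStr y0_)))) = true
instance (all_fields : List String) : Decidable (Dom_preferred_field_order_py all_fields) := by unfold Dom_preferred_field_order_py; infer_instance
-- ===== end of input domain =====

-- B replaces A's two accumulator-scanning loops by an ordered dedup plus one stable sort under a rank table (objective: simpler).

-- the literal `preferred` list both Python versions start from
def pvPreferred : List String :=
  ["id", "name", "event", "topic", "url", "target_url", "is_active", "enabled",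
   "created_at", "updated_at", "last_success_at", "last_error_at"]

-- ===== PORT A =====
def preferred_field_order_py (all_fields : List String) : List String :=
  let preferred := pvPreferred
  -- for f in preferred: if f in all_fields and f not in ordered: ordered.append(f)
  let ordered := preferred.foldl
    (fun ordered f => if all_fields.contains f && !(ordered.contains f) then ordered ++ [f] else ordered) []
  -- for f in all_fields: if f not in ordered: ordered.append(f)
  all_fields.foldl
    (fun ordered f => if !(ordered.contains f) then ordered ++ [f] else ordered) ordered

-- ===== PORT B =====
def preferred_field_order_py_alt (all_fields : List String) : List String :=
  let preferred := pvPreferred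
  -- rank = {f: i for i, f in enumerate(preferred)}
  let rank : PySem.Dict String Int :=
    (PySem.List.enumerate preferred 0).foldl (fun d p => d.insert p.2 p.1) PySem.Dict.empty
  -- deduped = list(dict.fromkeys(all_fields))
  let deduped := PySem.List.dedup all_fields
  -- sorted(deduped, key=lambda f: rank.get(f, len(preferred)))
  PySem.List.sorted deduped (fun f => rank.getD f (preferred.length : Int))

-- ===== PRECONDITION & SPEC =====
def Spec_preferred_field_order_py (all_fields : List String) (out : List String) : Prop := out = preferred_field_order_py_alt all_fields
instance (all_fields : List String) (out : List String) : Decidable (Spec_preferred_field_order_py all_fields out) := by unfold Spec_preferred_field_order_py; infer_instance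

-- ===== CLAIM (what is proved, stated in full; the proofs are below) =====
def Claim_equal_preferred_field_order_py : Prop := ∀ (all_fields : List String), Dom_preferred_field_order_py all_fields → Spec_preferred_field_order_py all_fields (preferred_field_order_py all_fields)

-- ===== LEMMAS AND PROOFS =====

-- B's key function, named for the proofs (definitionally the one the port uses)
def pvKey (f : String) : Int :=
  ((PySem.List.enumerate pvPreferred 0).foldl (fun d p => d.insert p.2 p.1) PySem.Dict.empty).getD f
    (pvPreferred.length : Int)

lemma pv_alt_eq (all_fields : List String) :
    preferred_field_order_py_alt all_fields = PySem.List.sorted (PySem.List.dedup all_fields) pvKey := rfl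

-- insertBy steps
lemma pv_insertBy_cons_of_before {α : Type} (before : α → α → Bool) (x y : α) (ys : List α)
    (h : before x y = true) : PySem.List.insertBy before x (y :: ys) = x :: y :: ys := by
  simp [PySem.List.insertBy, h]

lemma pv_insertBy_cons_of_not_before {α : Type} (before : α → α → Bool) (x y : α) (ys : List α)
    (h : before x y = false) :
    PySem.List.insertBy before x (y :: ys) = y :: PySem.List.insertBy before x ys := by
  simp [PySem.List.insertBy, h]

lemma pv_insertBy_front {α : Type} (before : α → α → Bool) (x : α) (ys : List α)
    (h : ∀ y ∈ ys, before x y = true) : PySem.List.insertBy before x ys = x :: ys := by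
  cases ys with
  | nil => rfl
  | cons y ys' => exact pv_insertBy_cons_of_before before x y ys' (h y (by simp))

-- inserting a preferred element into (filtered preferred prefix ++ strictly-larger-key rest)
lemma pv_ins_filter {α : Type} [DecidableEq α] (key : α → Int) :
    ∀ (P : List α), P.Pairwise (fun a b => key a < key b) →
    ∀ (x : α), x ∈ P → ∀ (p rest : List α), x ∉ p →
    (∀ y ∈ rest, key x < key y) →
    PySem.List.insertBy (fun a b => decide (key a < key b)) x
        (P.filter (fun f => decide (f ∈ p)) ++ rest)

      = P.filter (fun f => decide (f ∈ p ∨ f = x)) ++ rest := by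
  intro P
  induction P with
  | nil => intro _ x hx; simp at hx
  | cons q P' ih =>
    intro hpw x hx p rest hxp hrest
    rw [List.pairwise_cons] at hpw
    obtain ⟨hq, hpw'⟩ := hpw
    by_cases hqp : q ∈ p
    · have hxP' : x ∈ P' := by
        rcases List.mem_cons.mp hx with h | h
        · exact absurd (h ▸ hqp) hxp
        · exact h
      have hkey : key q < key x := hq x hxP'
      have hbef : (decide (key x < key q)) = false := by simp; omega
      rw [List.filter_cons_of_pos (by simpa using hqp), List.cons_append,
        pv_insertBy_cons_of_not_before _ _ _ _ hbef,
        ih hpw' x hxP' p rest hxp hrest,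
        List.filter_cons_of_pos (by simp [hqp]), List.cons_append]
    · by_cases hxq : x = q
      · subst hxq
        rw [List.filter_cons_of_neg (by simpa using hqp),
          List.filter_cons_of_pos (by simp), pv_insertBy_front]
        · have hcg : ∀ f ∈ P', (decide (f ∈ p)) = (decide (f ∈ p ∨ f = x)) := by
            intro f hf
            have hfx : f ≠ x := by
              intro h
              exact absurd (h ▸ hq f hf) (lt_irrefl _)
            simp [hfx]
          rw [List.filter_congr hcg, List.cons_append]
        · intro y hy
          rcases List.mem_append.mp hy with h | h
          · simpa using hq y (List.mem_of_mem_filter h)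
          · simpa using hrest y h
      · have hxP' : x ∈ P' := by
          rcases List.mem_cons.mp hx with h | h
          · exact absurd h hxq
          · exact h
        rw [List.filter_cons_of_neg (by simpa using hqp),
          List.filter_cons_of_neg (by simp [hqp, Ne.symm hxq]),
          ih hpw' x hxP' p rest hxp hrest]

-- the stable insertion sort of the dedup list, characterised
lemma pv_fold_sorted {α : Type} [DecidableEq α] (key : α → Int) (P : List α)
    (hpw : P.Pairwise (fun a b => key a < key b))
    (hout : ∀ f, f ∉ P → key f = (P.length : Int))
    (hin : ∀ f ∈ P, key f < (P.length : Int)) :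
    ∀ (xs p : List α), (p ++ xs).Nodup →
    xs.foldl (fun acc x => PySem.List.insertBy (fun a b => decide (key a < key b)) x acc)
        (P.filter (fun f => decide (f ∈ p)) ++ p.filter (fun f => decide (f ∉ P)))
      = P.filter (fun f => decide (f ∈ p ++ xs)) ++ (p ++ xs).filter (fun f => decide (f ∉ P)) := by
  intro xs
  induction xs with
  | nil => intro p _; simp
  | cons x xs' ih =>
    intro p hnd
    have hnd' : ((p ++ [x]) ++ xs').Nodup := by simpa [List.append_assoc] using hnd
    have hxp : x ∉ p := by
      rcases List.nodup_append.mp hnd with ⟨_, _, hdisj⟩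
      intro hmem
      exact hdisj x hmem x (by simp) rfl
    rw [List.foldl_cons]
    have hstep :
        PySem.List.insertBy (fun a b => decide (key a < key b)) x
            (P.filter (fun f => decide (f ∈ p)) ++ p.filter (fun f => decide (f ∉ P)))
          = P.filter (fun f => decide (f ∈ p ++ [x])) ++ (p ++ [x]).filter (fun f => decide (f ∉ P)) := by
      by_cases hxP : x ∈ P
      · rw [pv_ins_filter key P hpw x hxP p (p.filter (fun f => decide (f ∉ P))) hxp ?hrest]
        · have hcg : ∀ f ∈ P, (decide (f ∈ p ∨ f = x)) = (decide (f ∈ p ++ [x])) := by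
            intro f _
            simp
          rw [List.filter_congr hcg, List.filter_append,
            List.filter_cons_of_neg (by simp [hxP]), List.filter_nil, List.append_nil]
        case hrest =>
          intro y hy
          rw [List.mem_filter] at hy
          have hyP : y ∉ P := by simpa using hy.2
          rw [hout y hyP]
          exact hin x hxP
      · rw [PySem.List.insertBy_of_forall_not_before _ _ _ ?hnb]
        · have hcg : ∀ f ∈ P, (decide (f ∈ p)) = (decide (f ∈ p ++ [x])) := by
            intro f hf
            have hfx : f ≠ x := by
              intro h
              exact hxP (h ▸ hf)
            simp [hfx]
          rw [List.filter_congr hcg, List.filter_append,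
            List.filter_cons_of_pos (by simp [hxP]), List.filter_nil, List.append_assoc]
        case hnb =>
          intro y hy
          have hkx : key x = (P.length : Int) := hout x hxP
          have hky : key y ≤ (P.length : Int) := by
            rcases List.mem_append.mp hy with h | h
            · exact le_of_lt (hin y (List.mem_of_mem_filter h))
            · rw [hout y (by simpa using (List.mem_filter.mp h).2)]
          simp only [decide_eq_false_iff_not, not_lt]
          omega
    rw [hstep, ih (p ++ [x]) hnd']
    simp [List.append_assoc]

-- A's first loop
lemma pv_fold1 (all_fields : List String) :
    ∀ (P acc : List String), P.Nodup → (∀ f ∈ P, f ∉ acc) →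
    P.foldl (fun o f => if all_fields.contains f && !(o.contains f) then o ++ [f] else o) acc
      = acc ++ P.filter (fun f => all_fields.contains f) := by
  intro P
  induction P with
  | nil => intro acc _ _; simp
  | cons q P' ih =>
    intro acc hnd hdis
    rw [List.nodup_cons] at hnd
    rw [List.foldl_cons]
    by_cases hq : all_fields.contains q = true
    · have hqacc : (acc.contains q) = false := by
        simpa using hdis q (by simp)
      rw [if_pos (by rw [hq, hqacc]; simp)]
      rw [ih (acc ++ [q]) hnd.2 ?hdis']
      · rw [List.filter_cons_of_pos hq, List.append_assoc]
        rfl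
      case hdis' =>
        intro f hf
        have h1 : f ∉ acc := hdis f (by simp [hf])
        have h2 : f ≠ q := fun h => hnd.1 (h ▸ hf)
        simp [h1, h2]
    · have hq' : all_fields.contains q = false := by simpa using hq
      rw [if_neg (by rw [hq']; simp)]
      rw [ih acc hnd.2 (fun f hf => hdis f (by simp [hf])),
        List.filter_cons_of_neg (by rw [hq']; simp)]

-- A's second loop is set.update
lemma pv_fold2 (acc xs : List String) :
    xs.foldl (fun o f => if !(o.contains f) then o ++ [f] else o) acc = PySem.Set.update acc xs := by
  have h : (fun (o : List String) f => if !(o.contains f) then o ++ [f] else o) = PySem.Set.add := by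
    funext o f
    by_cases hc : o.contains f = true <;> simp [PySem.Set.add, PySem.Set.contains]
  rw [h]
  rfl

-- key facts
lemma pv_key_pairwise : pvPreferred.Pairwise (fun a b => pvKey a < pvKey b) := by decide
lemma pv_key_in : ∀ f ∈ pvPreferred, pvKey f < (pvPreferred.length : Int) := by decide
lemma pv_key_out : ∀ f, f ∉ pvPreferred → pvKey f = (pvPreferred.length : Int) := by
  intro f hf
  simp only [pvPreferred, List.mem_cons, List.not_mem_nil, or_false, not_or] at hf
  obtain ⟨h1, h2, h3, h4, h5, h6, h7, h8, h9, h10, h11, h12⟩ := hf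
  have hd : ((PySem.List.enumerate pvPreferred 0).foldl (fun d p => d.insert p.2 p.1) PySem.Dict.empty)
      = PySem.Dict.mk [("id", 0), ("name", 1), ("event", 2), ("topic", 3), ("url", 4),
          ("target_url", 5), ("is_active", 6), ("enabled", 7), ("created_at", 8),
          ("updated_at", 9), ("last_success_at", 10), ("last_error_at", 11)] := by decide
  unfold pvKey
  rw [hd]
  have e1 : (("id" : String) == f) = false := beq_eq_false_iff_ne.mpr (Ne.symm h1)
  have e2 : (("name" : String) == f) = false := beq_eq_false_iff_ne.mpr (Ne.symm h2)
  have e3 : (("event" : String) == f) = false := beq_eq_false_iff_ne.mpr (Ne.symm h3)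
  have e4 : (("topic" : String) == f) = false := beq_eq_false_iff_ne.mpr (Ne.symm h4)
  have e5 : (("url" : String) == f) = false := beq_eq_false_iff_ne.mpr (Ne.symm h5)
  have e6 : (("target_url" : String) == f) = false := beq_eq_false_iff_ne.mpr (Ne.symm h6)
  have e7 : (("is_active" : String) == f) = false := beq_eq_false_iff_ne.mpr (Ne.symm h7)
  have e8 : (("enabled" : String) == f) = false := beq_eq_false_iff_ne.mpr (Ne.symm h8)
  have e9 : (("created_at" : String) == f) = false := beq_eq_false_iff_ne.mpr (Ne.symm h9)
  have e10 : (("updated_at" : String) == f) = false := beq_eq_false_iff_ne.mpr (Ne.symm h10)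
  have e11 : (("last_success_at" : String) == f) = false := beq_eq_false_iff_ne.mpr (Ne.symm h11)
  have e12 : (("last_error_at" : String) == f) = false := beq_eq_false_iff_ne.mpr (Ne.symm h12)
  simp [PySem.Dict.getD, PySem.Dict.get?, List.find?, pvPreferred,
    e1, e2, e3, e4, e5, e6, e7, e8, e9, e10, e11, e12]

-- assembly helpers
lemma pv_E1 (all_fields : List String) :
    pvPreferred.filter (fun f => all_fields.contains f)
      = pvPreferred.filter (fun f => decide (f ∈ PySem.List.dedup all_fields)) := by
  apply List.filter_congr
  intro f _
  simp

lemma pv_E2 (all_fields : List String) :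
    (PySem.Set.ofList all_fields).filter
        (fun y => !(PySem.Set.contains (pvPreferred.filter (fun f => all_fields.contains f)) y))
      = (PySem.List.dedup all_fields).filter (fun y => decide (y ∉ pvPreferred)) := by
  rw [PySem.List.dedup_eq_ofList]
  apply List.filter_congr
  intro y hy
  have hya : y ∈ all_fields := by
    have := PySem.Set.mem_ofList (xs := all_fields) (y := y)
    tauto
  by_cases hyP : y ∈ pvPreferred <;>
    simp [PySem.Set.contains, List.mem_filter, hyP, hya]

-- ===== VERDICT (by name: the statement is the Claim_ definition above) =====
theorem preferred_field_order_py_spec : Claim_equal_preferred_field_order_py := by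
  intro all_fields _
  unfold Spec_preferred_field_order_py
  have hA : preferred_field_order_py all_fields
      = all_fields.foldl (fun o f => if !(o.contains f) then o ++ [f] else o)
          (pvPreferred.foldl
            (fun o f => if all_fields.contains f && !(o.contains f) then o ++ [f] else o) []) := rfl
  rw [hA, pv_fold1 all_fields pvPreferred [] (by decide) (by simp), pv_fold2,
    PySem.Set.update_eq_append_filter, pv_alt_eq, PySem.List.sorted_eq_foldl_insertBy]
  have hB := pv_fold_sorted pvKey pvPreferred pv_key_pairwise pv_key_out pv_key_in
    (PySem.List.dedup all_fields) [] (by simp)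
  simp only [List.nil_append, List.filter_nil, List.append_nil] at hB
  have h0 : pvPreferred.filter (fun f => decide (f ∈ ([] : List String))) = [] := by simp
  rw [h0] at hB
  refine Eq.trans ?_ hB.symm
  simp only [List.nil_append]
  rw [pv_E2 all_fields, pv_E1 all_fields]
  rfl
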